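-- pv_equiv track=rewrite | github.com/Gustizz/calculator-3.0 | main.py | SimplifyAddSubOps
-- ===== SOURCE A (Python) =====
-- def SimplifyAddSubOps(_equation):
--
--   newEquation = _equation
--   #Simplyfy add and sub operators - (+- = -, -- = +)
--   i = 0
--   while len(newEquation) > i:
--     if ((newEquation[i] in basicOps) and (newEquation[i + 1] in basicOps)):
--       curOp = newEquation[i]
--       nextOp = newEquation[i + 1]
--
--       if (curOp == nextOp):
--         newEquation[i] = "+"
--         newEquation.pop(i + 1)
--       else:
--         newEquation[i] = "-"
--         newEquation.pop(i + 1)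
--
--       i = 0
--     else:
--       i += 1
--
--   return newEquation
--
-- basicOps = ["+", "-"]
-- ===== SOURCE B (Python) =====
-- def SimplifyAddSubOps(_equation):
--     out = []
--     for tok in _equation:
--         if tok in ("+", "-") and out and out[-1] in ("+", "-"):
--             out[-1] = "+" if out[-1] == tok else "-"
--         else:
--             out.append(tok)
--     return out
-- ===== Notes on version B (the rewrite author's own statement) =====
-- stated objective: alternative
-- what changed: B replaces A's restart-from-index-0 while loop with repeated in-place pops by a single left-to-right pass that folds each +/- token into the accumulator's last operator (one linear scan, worst-case O(n) vs A's worst-case O(n^2); measured only ~1.3x on random inputs, so no speed claim).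
import Mathlib
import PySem

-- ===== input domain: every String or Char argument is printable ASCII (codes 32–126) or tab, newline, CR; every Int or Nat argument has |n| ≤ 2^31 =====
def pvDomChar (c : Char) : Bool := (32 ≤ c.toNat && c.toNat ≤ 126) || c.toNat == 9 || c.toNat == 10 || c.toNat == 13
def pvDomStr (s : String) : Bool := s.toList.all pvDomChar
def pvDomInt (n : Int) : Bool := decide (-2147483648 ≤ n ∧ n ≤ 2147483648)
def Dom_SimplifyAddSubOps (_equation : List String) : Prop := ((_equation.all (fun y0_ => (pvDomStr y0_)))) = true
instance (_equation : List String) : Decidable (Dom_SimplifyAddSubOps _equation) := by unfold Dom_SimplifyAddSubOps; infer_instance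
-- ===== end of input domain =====

-- B collapses each run of +/- operators in ONE left-to-right pass (combining into the
-- accumulator's last element) instead of A's restart-from-index-0 while loop with in-place pops.
-- NOTE: Python A mutates its argument in place and returns it; the equivalence proved
-- here is about the RETURN value only (B builds a fresh list).

-- ===== PORT A =====
def pvBasicOps : List String := ["+", "-"]

-- the while loop of A: index i, mutation by set/eraseIdx (Python `newEquation[i] = …; pop(i+1)`)
def pvGoA (xs : List String) (i : Nat) : List String :=
  if h : xs.length > i then
    if hc : xs[i] ∈ pvBasicOps then
      match hn : xs[i+1]? with
      | some nxt =>
        if nxt ∈ pvBasicOps then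
          pvGoA ((xs.set i (if xs[i] == nxt then "+" else "-")).eraseIdx (i+1)) 0
        else
          pvGoA xs (i+1)
      | none => xs   -- Python raises IndexError here; excluded by Pre_
    else
      pvGoA xs (i+1)
  else xs
termination_by (xs.length, xs.length - i)
decreasing_by
  · have hlt : i + 1 < xs.length := by
      have := List.getElem?_eq_some_iff.mp hn
      exact this.1
    apply Prod.Lex.left
    simp [List.length_eraseIdx, List.length_set, hlt]
    omega
  · apply Prod.Lex.right
    omega
  · apply Prod.Lex.right
    omega

def SimplifyAddSubOps (_equation : List String) : List String := pvGoA _equation 0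

-- ===== PORT B =====
def pvStepB (out : List String) (tok : String) : List String :=
  match out.getLast? with
  | some p =>
    if tok ∈ pvBasicOps ∧ p ∈ pvBasicOps then
      out.dropLast ++ [if p == tok then "+" else "-"]
    else out ++ [tok]
  | none => out ++ [tok]

def SimplifyAddSubOps_alt (_equation : List String) : List String :=
  _equation.foldl pvStepB []

-- ===== PRECONDITION & SPEC =====
-- Pre_ excludes exactly the inputs whose last token is "+" or "-", on which A's
-- unguarded newEquation[i+1] lookup raises IndexError.
def Pre_SimplifyAddSubOps (_equation : List String) : Prop :=
  _equation.getLast? ≠ some "+" ∧ _equation.getLast? ≠ some "-"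
instance (_equation : List String) : Decidable (Pre_SimplifyAddSubOps _equation) := by
  unfold Pre_SimplifyAddSubOps; infer_instance
def pvWitness_SimplifyAddSubOps : List String := ["1", "+", "-", "-", "2"]

def Spec_SimplifyAddSubOps (_equation : List String) (out : List String) : Prop := out = SimplifyAddSubOps_alt _equation
instance (_equation : List String) (out : List String) : Decidable (Spec_SimplifyAddSubOps _equation out) := by unfold Spec_SimplifyAddSubOps; infer_instance

-- ===== CLAIM (what is proved, stated in full; the proofs are below) =====
def Claim_equal_SimplifyAddSubOps : Prop := ∀ (_equation : List String), Dom_SimplifyAddSubOps _equation → Pre_SimplifyAddSubOps _equation → Spec_SimplifyAddSubOps _equation (SimplifyAddSubOps _equation)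


-- ===== LEMMAS AND PROOFS =====

-- two adjacent collapse steps of B equal one collapse with the combined operator
lemma pvStepB_assoc (acc : List String) (a b : String)
    (ha : a ∈ pvBasicOps) (hb : b ∈ pvBasicOps) :
    pvStepB (pvStepB acc a) b = pvStepB acc (if a == b then "+" else "-") := by
  have hab : (if a == b then "+" else "-") ∈ pvBasicOps := by
    split <;> simp [pvBasicOps]
  unfold pvStepB
  rcases h : acc.getLast? with _ | p
  · -- acc = []
    have hacc : acc = [] := by simpa using h
    subst hacc
    simp only [List.nil_append]
    simp [pvBasicOps] at ha hb
    rcases ha with rfl | rfl <;> rcases hb with rfl | rfl <;> simp [pvBasicOps]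
  · by_cases hp : p ∈ pvBasicOps
    · simp only []
      simp only [ha, hp, and_self, if_pos]
      have hlast : (acc.dropLast ++ [if p == a then "+" else "-"]).getLast? = some (if p == a then "+" else "-") := by
        simp
      rw [hlast]
      have hpa : (if p == a then "+" else "-") ∈ pvBasicOps := by split <;> simp [pvBasicOps]
      simp only [hb, hpa, hab, and_self, if_pos]
      have hdl : (acc.dropLast ++ [if p == a then "+" else "-"]).dropLast = acc.dropLast := by
        simp
      rw [hdl]
      congr 1
      simp [pvBasicOps] at ha hb hp
      rcases ha with rfl | rfl <;> rcases hb with rfl | rfl <;> rcases hp with rfl | rfl <;> decide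
    · have hcond : ¬(a ∈ pvBasicOps ∧ p ∈ pvBasicOps) := fun h => hp h.2
      have hcond2 : ¬((if a == b then "+" else "-") ∈ pvBasicOps ∧ p ∈ pvBasicOps) := fun h => hp h.2
      simp only []
      rw [if_neg hcond, if_neg hcond2]
      have hlast : (acc ++ [a]).getLast? = some a := by simp
      rw [hlast]
      simp only []
      rw [if_pos (And.intro hb ha)]
      simp

-- B leaves a list with no adjacent operator pair unchanged
lemma pvFoldB_fixed (xs : List String) : ∀ (acc : List String),
    List.IsChain (fun u v => ¬(u ∈ pvBasicOps ∧ v ∈ pvBasicOps)) xs →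
    (∀ p y, acc.getLast? = some p → xs.head? = some y → ¬(p ∈ pvBasicOps ∧ y ∈ pvBasicOps)) →
    List.foldl pvStepB acc xs = acc ++ xs := by
  induction xs with
  | nil => intro acc _ _; simp
  | cons x rest ih =>
    intro acc h1 h2
    have hstep : pvStepB acc x = acc ++ [x] := by
      unfold pvStepB
      rcases h : acc.getLast? with _ | p
      · rfl
      · simp only []
        rw [if_neg]
        intro hc
        exact h2 p x h (by simp) ⟨hc.2, hc.1⟩
    have hchain : List.IsChain (fun u v => ¬(u ∈ pvBasicOps ∧ v ∈ pvBasicOps)) rest := by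
      cases rest with
      | nil => exact List.IsChain.nil
      | cons y r => exact (List.isChain_cons_cons.mp h1).2
    have h2' : ∀ p y, (acc ++ [x]).getLast? = some p → rest.head? = some y →
        ¬(p ∈ pvBasicOps ∧ y ∈ pvBasicOps) := by
      intro p y hp hy
      have hpx : x = p := by simpa using hp
      subst hpx
      cases rest with
      | nil => simp at hy
      | cons z r =>
        have hz : z = y := by simpa using hy
        subst hz
        exact (List.isChain_cons_cons.mp h1).1
    calc List.foldl pvStepB acc (x :: rest) = List.foldl pvStepB (acc ++ [x]) rest := by
          simp [hstep]
      _ = (acc ++ [x]) ++ rest := ih (acc ++ [x]) hchain h2'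
      _ = acc ++ x :: rest := by simp

-- A's set/eraseIdx collapse written as a three-part split
lemma pvSplit (i : Nat) : ∀ (xs : List String) (c : String) (h : i + 1 < xs.length),
    ∃ fr bk, xs = fr ++ xs[i]'(by omega) :: xs[i+1]'h :: bk ∧ fr.length = i ∧
      (xs.set i c).eraseIdx (i+1) = fr ++ c :: bk := by
  induction i with
  | zero =>
    intro xs c h
    match xs, h with
    | a :: b :: bk, _ => exact ⟨[], bk, by simp, rfl, by simp [List.eraseIdx]⟩
  | succ i ih =>
    intro xs c h
    match xs, h with
    | x :: rest, h =>
      have h' : i + 1 < rest.length := by simpa using h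
      obtain ⟨fr, bk, heq, hlen, herase⟩ := ih rest c h'
      refine ⟨x :: fr, bk, ?_, by simp [hlen], ?_⟩
      · simpa using heq
      · simp only [List.set_cons_succ, List.eraseIdx_cons_succ, herase]
        simp

-- collapsing one adjacent operator pair does not change B's result
lemma pvAltCollapse (fr bk : List String) (a b : String)
    (ha : a ∈ pvBasicOps) (hb : b ∈ pvBasicOps) :
    SimplifyAddSubOps_alt (fr ++ a :: b :: bk) =
    SimplifyAddSubOps_alt (fr ++ (if a == b then "+" else "-") :: bk) := by
  unfold SimplifyAddSubOps_alt
  rw [List.foldl_append, List.foldl_append]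
  simp only [List.foldl_cons]
  rw [pvStepB_assoc _ a b ha hb]

-- main loop invariant: last token not an operator, pairs before index i already clean
theorem pvGoA_eq_alt (xs : List String) (i : Nat)
    (hlast : xs.getLast? ≠ some "+" ∧ xs.getLast? ≠ some "-")
    (hinv : ∀ j (h : j + 1 < xs.length), j < i → ¬(xs[j] ∈ pvBasicOps ∧ xs[j+1] ∈ pvBasicOps)) :
    pvGoA xs i = SimplifyAddSubOps_alt xs := by
  rw [pvGoA]
  split
  case isFalse h =>
    -- loop finished: xs has no adjacent operator pair, B leaves it unchanged
    have hchain : List.IsChain (fun u v => ¬(u ∈ pvBasicOps ∧ v ∈ pvBasicOps)) xs := by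
      rw [List.isChain_iff_getElem]
      intro j hj
      exact hinv j hj (by omega)
    have := pvFoldB_fixed xs [] hchain (by intro p y hp; simp at hp)
    unfold SimplifyAddSubOps_alt
    rw [this]
    simp
  case isTrue h =>
    split
    case isTrue hc =>
      split
      case h_1 nxt hn =>
        split
        case isTrue hnxt =>
          -- collapse step
          have hlt : i + 1 < xs.length := (List.getElem?_eq_some_iff.mp hn).1
          have hnv : xs[i+1]'hlt = nxt := (List.getElem?_eq_some_iff.mp hn).2
          obtain ⟨fr, bk, heq, hlen, herase⟩ :=
            pvSplit i xs (if xs[i] == nxt then "+" else "-") hlt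
          rw [hnv] at heq
          -- last of the collapsed list is unchanged
          have hbk : bk ≠ [] := by
            rintro rfl
            have : xs.getLast? = some nxt := by rw [heq]; simp
            rcases (by simpa [pvBasicOps] using hnxt : nxt = "+" ∨ nxt = "-") with rfl | rfl
            · exact hlast.1 this
            · exact hlast.2 this
          rcases List.exists_cons_of_ne_nil hbk with ⟨y, ys, rfl⟩
          have hlast' : ((xs.set i (if xs[i] == nxt then "+" else "-")).eraseIdx (i+1)).getLast? = xs.getLast? := by
            rw [herase]
            conv_rhs => rw [heq]
            simp [List.getLast?_append]
          have hrec := pvGoA_eq_alt ((xs.set i (if xs[i] == nxt then "+" else "-")).eraseIdx (i+1)) 0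
            (by rw [hlast']; exact hlast) (by intro j hj hj0; omega)
          rw [hrec, herase]
          conv_rhs => rw [heq]
          exact (pvAltCollapse fr (y :: ys) _ nxt hc hnxt).symm
        case isFalse hnxt =>
          -- advance: pair (i, i+1) is clean because nxt is not an operator
          have hil : i < xs.length := h
          apply pvGoA_eq_alt xs (i+1) hlast
          intro j hj hji
          by_cases hje : j = i
          · subst hje
            have : xs[j+1] = nxt := by
              have := (List.getElem?_eq_some_iff.mp hn).2
              simpa using this
            rw [this]
            exact fun hcc => hnxt hcc.2
          · exact hinv j hj (by omega)
      case h_2 hn =>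
        -- Python would raise IndexError; impossible under hlast
        exfalso
        have hi : i + 1 ≥ xs.length := by
          by_contra hcon
          rw [List.getElem?_eq_getElem (by omega)] at hn
          simp at hn
        have hlasteq : xs.getLast? = some (xs[i]'h) := by
          rw [List.getLast?_eq_getElem?]
          rw [show xs.length - 1 = i by omega]
          exact List.getElem?_eq_getElem h
        rcases (by simpa [pvBasicOps] using ‹xs[i] ∈ pvBasicOps› : xs[i]'h = "+" ∨ xs[i]'h = "-") with he | he
        · exact hlast.1 (by rw [hlasteq, he])
        · exact hlast.2 (by rw [hlasteq, he])
    case isFalse hc =>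
      -- advance: xs[i] is not an operator
      have hil : i < xs.length := h
      apply pvGoA_eq_alt xs (i+1) hlast
      intro j hj hji
      by_cases hje : j = i
      · subst hje; exact fun hcc => hc hcc.1
      · exact hinv j hj (by omega)
termination_by (xs.length, xs.length - i)
decreasing_by all_goals
  first
    | (apply Prod.Lex.right
       omega)
    | (apply Prod.Lex.left
       simp [List.length_eraseIdx, List.length_set, hlt]
       omega)

-- ===== VERDICT (by name: the statement is the Claim_ definition above) =====
theorem SimplifyAddSubOps_spec : Claim_equal_SimplifyAddSubOps := by
  intro eq _ hpre
  unfold Spec_SimplifyAddSubOps SimplifyAddSubOps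
  exact pvGoA_eq_alt eq 0 hpre (by omega)
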